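-- pv_equiv track=rewrite | github.com/nju-websoft/ReadPyE | python_parser/project_parser.py | _find_prefix_items
-- ===== SOURCE A (Python) =====
-- def _find_prefix_items(prefixes, src_list):
--     ret = set()
--     if len(prefixes) == 0:
--         return ret
--
--     for item in src_list:
--         # is or startswith one prefix
--         if item in prefixes:
--             ret.add(item)
--         else:
--             for prefix in prefixes:
--                 if item.startswith(prefix+'.'):
--                     ret.add(item)
--                     break
--
--     return ret
-- ===== SOURCE B (Python) =====
-- def _find_prefix_items(prefixes, src_list):
--     # Index the prefixes in a hash set once; for each item test only its own
--     # dot-boundary truncations against that set (no scan over the prefixes).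
--     pset = set(prefixes)
--     ret = set()
--     for item in src_list:
--         if item in pset:
--             ret.add(item)
--             continue
--         for i, ch in enumerate(item):
--             if ch == '.' and item[:i] in pset:
--                 ret.add(item)
--                 break
--     return ret
-- ===== Notes on version B (the rewrite author's own statement) =====
-- stated objective: faster
-- what changed: Instead of scanning every prefix with startswith for each item, B builds a hash set of the prefixes once and, per item, tests only the item's own dot-boundary truncations (item[:i] for each '.' at position i, plus the item itself) for membership in that set.
import Mathlib
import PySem

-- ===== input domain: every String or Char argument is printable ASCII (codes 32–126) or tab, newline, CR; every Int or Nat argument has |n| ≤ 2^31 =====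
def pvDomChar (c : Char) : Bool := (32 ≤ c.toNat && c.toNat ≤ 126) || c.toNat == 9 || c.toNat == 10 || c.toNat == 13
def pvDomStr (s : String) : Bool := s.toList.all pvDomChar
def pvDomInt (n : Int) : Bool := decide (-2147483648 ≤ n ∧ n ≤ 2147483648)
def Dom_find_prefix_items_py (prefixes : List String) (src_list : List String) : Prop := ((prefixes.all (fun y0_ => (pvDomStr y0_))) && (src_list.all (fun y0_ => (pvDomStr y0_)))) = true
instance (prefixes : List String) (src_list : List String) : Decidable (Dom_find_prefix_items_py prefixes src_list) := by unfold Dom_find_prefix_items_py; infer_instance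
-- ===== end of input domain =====

-- ===== PORT A =====
-- Port of A: for each item, 'item in prefixes' then an inner scan over prefixes
-- with startswith(prefix+'.') (the loop body only adds once, so break = any).
def find_prefix_items_py (prefixes : List String) (src_list : List String) : List String :=
  let ret : PySem.Set String := PySem.Set.empty
  if prefixes.length = 0 then ret
  else
    src_list.foldl (fun ret item =>
      if prefixes.contains item then PySem.Set.add ret item
      else if prefixes.any (fun pre => PySem.Chars.startswith item.toList (pre.toList ++ ['.'])) then
        PySem.Set.add ret item
      else ret) ret

-- ===== PORT B =====
-- Port of B: hash-set the prefixes once; per item test only its own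
-- dot-boundary truncations for membership in that set.
def find_prefix_items_py_alt (prefixes : List String) (src_list : List String) : List String :=
  let pset := PySem.Set.ofList prefixes
  src_list.foldl (fun ret item =>
    if pset.contains item then PySem.Set.add ret item
    else if (PySem.List.enumerate item.toList 0).any (fun ic =>
        ic.2 == '.' && pset.contains (String.ofList (item.toList.take ic.1.toNat))) then
      PySem.Set.add ret item
    else ret) PySem.Set.empty

-- ===== PRECONDITION & SPEC =====
def Spec_find_prefix_items_py (prefixes : List String) (src_list : List String) (out : List String) : Prop := out = find_prefix_items_py_alt prefixes src_list
instance (prefixes : List String) (src_list : List String) (out : List String) : Decidable (Spec_find_prefix_items_py prefixes src_list out) := by unfold Spec_find_prefix_items_py; infer_instance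

-- ===== CLAIM (what is proved, stated in full; the proofs are below) =====
def Claim_equal_find_prefix_items_py : Prop := ∀ (prefixes : List String) (src_list : List String), Dom_find_prefix_items_py prefixes src_list → Spec_find_prefix_items_py prefixes src_list (find_prefix_items_py prefixes src_list)

-- ===== LEMMAS AND PROOFS =====

-- membership in the hash set = membership in the list
lemma contains_ofList (l : List String) (x : String) :
    (PySem.Set.ofList l).contains x = l.contains x := by
  simp [PySem.Set.mem_ofList]

-- the key per-item fact: some prefix matches via startswith(prefix+'.')
-- iff some dot-boundary truncation of the item is one of the prefixes
lemma any_startswith_eq (prefixes : List String) (item : String) :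
    prefixes.any (fun pre => PySem.Chars.startswith item.toList (pre.toList ++ ['.']))
      = (PySem.List.enumerate item.toList 0).any (fun ic =>
          ic.2 == '.' && (PySem.Set.ofList prefixes).contains (String.ofList (item.toList.take ic.1.toNat))) := by
  apply Bool.eq_iff_iff.mpr
  simp only [List.any_eq_true, PySem.Chars.startswith_iff, PySem.List.mem_enumerate_iff]
  constructor
  · rintro ⟨p, hp, t, ht⟩
    have hx : item.toList = p.toList ++ '.' :: t := by rw [← ht]; simp
    have hlen : p.toList.length < item.toList.length := by rw [hx]; simp
    have hlen' : p.length < item.toList.length := by simpa using hlen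
    have hget : item.toList[p.length]'hlen' = '.' := by
      simp only [hx]
      rw [List.getElem_append_right (by simp)]
      simp
    have htake : item.toList.take p.length = p.toList := by
      rw [hx]
      rw [show p.length = p.toList.length by simp]
      simp
    refine ⟨((p.length : Int), '.'), ⟨p.length, hlen', ?_⟩, ?_⟩
    · simp [hget]
    · simp [PySem.Set.mem_ofList, htake, hp]
  · rintro ⟨⟨i, c⟩, ⟨k, hk, hpair⟩, hcond⟩
    rw [Prod.mk.injEq] at hpair
    obtain ⟨hi, hc⟩ := hpair
    subst hi hc
    simp only [beq_iff_eq, Bool.and_eq_true, PySem.Set.contains_eq_listContains,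
      List.contains_eq_mem, PySem.Set.mem_ofList, decide_eq_true_eq] at hcond
    obtain ⟨hdot, hmem⟩ := hcond
    rw [show (0 + (k : Int)).toNat = k by omega] at hmem
    refine ⟨String.ofList (item.toList.take k), hmem, item.toList.drop (k + 1), ?_⟩
    have h2 := List.take_append_drop k item.toList
    rw [List.drop_eq_getElem_cons hk] at h2
    simpa [hdot] using h2

-- ===== VERDICT (by name: the statement is the Claim_ definition above) =====
theorem find_prefix_items_py_spec : Claim_equal_find_prefix_items_py := by
  intro prefixes src_list _
  show find_prefix_items_py prefixes src_list = find_prefix_items_py_alt prefixes src_list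
  simp only [find_prefix_items_py, find_prefix_items_py_alt]
  by_cases hp : prefixes = []
  · subst hp
    simp [PySem.Set.ofList, PySem.Set.empty]
  · rw [if_neg (by simpa using hp)]
    congr 1
    funext ret item
    rw [← contains_ofList, any_startswith_eq]
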